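-- pv_equiv track=rewrite | github.com/edge7/mystuff | processing/processing.py | merge_close_values
-- ===== SOURCE A (Python) =====
-- def merge_close_values(values):
--     new_values = []
--     values.sort()
--     for index, v in enumerate(values):
--         if index == 0:
--             continue
--         if values[index] - values[index - 1] < 2:
--             new_values = new_values[:-1]
--
--         new_values.append(v)
--     return new_values
-- ===== SOURCE B (Python) =====
-- def merge_close_values(values):
--     values.sort()
--     tail = values[1:]
--     return [a for a, b in zip(tail, tail[1:]) if b - a >= 2] + tail[-1:]
-- ===== Notes on version B (the rewrite author's own statement) =====
-- stated objective: faster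
-- what changed: Replaces A's backward pop-and-replace accumulator (new_values[:-1] copies the whole accumulator on every merge, quadratic on merge-heavy inputs) with a single forward lookahead pass over adjacent pairs of the sorted list that keeps each element whose successor is >= 2 away, plus the last.
import Mathlib
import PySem

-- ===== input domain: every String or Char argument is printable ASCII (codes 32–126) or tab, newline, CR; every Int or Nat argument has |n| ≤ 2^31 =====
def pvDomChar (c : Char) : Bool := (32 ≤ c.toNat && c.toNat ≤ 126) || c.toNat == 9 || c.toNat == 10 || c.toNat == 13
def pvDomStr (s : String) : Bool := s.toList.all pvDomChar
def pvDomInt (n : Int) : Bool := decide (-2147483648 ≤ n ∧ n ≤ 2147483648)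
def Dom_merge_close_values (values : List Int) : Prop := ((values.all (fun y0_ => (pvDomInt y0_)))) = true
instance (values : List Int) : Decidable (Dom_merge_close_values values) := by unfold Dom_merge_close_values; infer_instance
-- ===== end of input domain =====

-- B replaces A's backward pop-and-replace accumulation with a forward lookahead selection over
-- adjacent pairs of the sorted list (objective: faster — A copies its accumulator on every merge). Both A and B sort the argument in
-- place; the equivalence proved here is about the return value (the mutation is identical).

-- ===== PORT A =====
def merge_close_values (values : List Int) : List Int :=
  let vs := PySem.List.sorted values (fun x => x)
  (PySem.List.enumerate vs).foldl
    (fun new_values iv =>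
      if iv.1 == 0 then new_values
      else
        (if PySem.List.pyGetD vs iv.1 0 - PySem.List.pyGetD vs (iv.1 - 1) 0 < 2
         then PySem.List.slice new_values none (some (-1))
         else new_values) ++ [iv.2])
    []

-- ===== PORT B =====
def merge_close_values_alt (values : List Int) : List Int :=
  let vs := PySem.List.sorted values (fun x => x)
  let tail := PySem.List.slice vs (some 1) none
  ((tail.zip (PySem.List.slice tail (some 1) none)).filter
      (fun p => decide (2 ≤ p.2 - p.1))).map Prod.fst
    ++ PySem.List.slice tail (some (-1)) none

-- ===== PRECONDITION & SPEC =====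
def Spec_merge_close_values (values : List Int) (out : List Int) : Prop := out = merge_close_values_alt values
instance (values : List Int) (out : List Int) : Decidable (Spec_merge_close_values values out) := by unfold Spec_merge_close_values; infer_instance

-- ===== CLAIM (what is proved, stated in full; the proofs are below) =====
def Claim_equal_merge_close_values : Prop := ∀ (values : List Int), Dom_merge_close_values values → Spec_merge_close_values values (merge_close_values values)

-- ===== LEMMAS AND PROOFS =====

-- the common value both loops compute over a list t: each element of t that is the right
-- boundary of a run of gaps < 2 (i.e. followed by a gap ≥ 2, or last)
def keepRight : List Int → List Int
  | [] => []
  | [a] => [a]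
  | a :: b :: r => (if b - a < 2 then [] else [a]) ++ keepRight (b :: r)

-- A's loop body acting on the remaining values, with the previous value carried explicitly
def aStep : Int → List Int → List Int → List Int
  | _, [], acc => acc
  | prev, v :: r, acc => aStep v r ((if v - prev < 2 then acc.dropLast else acc) ++ [v])

theorem aStep_eq (t : List Int) : ∀ (prev : Int) (acc : List Int),
    aStep prev t acc
      = (if t.headD (prev + 2) - prev < 2 then acc.dropLast else acc) ++ keepRight t := by
  induction t with
  | nil => intro prev acc; simp [aStep, keepRight]
  | cons v r ih =>
    intro prev acc
    cases r with
    | nil => simp [aStep, keepRight]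
    | cons w r' =>
      show aStep v (w :: r') ((if v - prev < 2 then acc.dropLast else acc) ++ [v]) = _
      rw [ih]
      simp only [List.headD_cons, keepRight]
      split_ifs <;> simp

theorem A_loop (s : List Int) : ∀ (t : List Int) (k : Nat) (prev : Int) (acc : List Int),
    1 ≤ k → s.drop (k - 1) = prev :: t →
    (PySem.List.enumerate t (k : Int)).foldl
      (fun new_values iv =>
        if iv.1 == 0 then new_values
        else
          (if PySem.List.pyGetD s iv.1 0 - PySem.List.pyGetD s (iv.1 - 1) 0 < 2
           then PySem.List.slice new_values none (some (-1))
           else new_values) ++ [iv.2]) acc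
      = aStep prev t acc := by
  intro t
  induction t with
  | nil => intro k prev acc _ _; simp [PySem.List.enumerate_nil, aStep]
  | cons v r ih =>
    intro k prev acc hk hdrop
    have hk0 : ¬ ((k : Int) == 0) = true := by simp; omega
    have hsk : s[k]? = some v := by
      have h1 : (s.drop (k - 1))[1]? = some v := by rw [hdrop]; rfl
      rw [List.getElem?_drop] at h1
      have : k - 1 + 1 = k := by omega
      rwa [this] at h1
    have hsk1 : s[k - 1]? = some prev := by
      have h0 : (s.drop (k - 1))[0]? = some prev := by rw [hdrop]; rfl
      rwa [List.getElem?_drop, Nat.add_zero] at h0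
    have hcast : (k : Int) - 1 = ((k - 1 : Nat) : Int) := by omega
    rw [PySem.List.enumerate_cons, List.foldl_cons, if_neg hk0]
    simp only [hcast, PySem.List.pyGetD_natCast,
      List.getD_eq_getElem?_getD, hsk, hsk1, Option.getD_some,
      PySem.List.slice_to_neg_one]
    have hdrop' : s.drop (k + 1 - 1) = v :: r := by
      have h2 := congrArg (List.drop 1) hdrop
      rw [List.drop_drop] at h2
      rw [show k + 1 - 1 = k - 1 + 1 by omega]
      simpa using h2
    have hih := ih (k + 1) v ((if v - prev < 2 then acc.dropLast else acc) ++ [v])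
      (by omega) hdrop'
    simp only [PySem.List.slice_to_neg_one] at hih
    rw [show ((k : Int) + 1) = ((k + 1 : Nat) : Int) by push_cast; ring]
    rw [hih]
    simp only [aStep]

theorem A_eq (s : List Int) :
    (PySem.List.enumerate s).foldl
      (fun new_values iv =>
        if iv.1 == 0 then new_values
        else
          (if PySem.List.pyGetD s iv.1 0 - PySem.List.pyGetD s (iv.1 - 1) 0 < 2
           then PySem.List.slice new_values none (some (-1))
           else new_values) ++ [iv.2]) []
      = keepRight s.tail := by
  cases s with
  | nil => simp [PySem.List.enumerate_nil, keepRight]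
  | cons x t =>
    rw [PySem.List.enumerate, List.foldl_cons]
    rw [if_pos (show ((0 : Int) == 0) = true from rfl)]
    rw [show ((0 : Int) + 1) = ((1 : Nat) : Int) by norm_num]
    rw [A_loop (x :: t) t 1 x [] (by omega) (by simp)]
    rw [aStep_eq]
    simp

theorem B_eq (t : List Int) :
    ((t.zip t.tail).filter (fun p => decide (2 ≤ p.2 - p.1))).map Prod.fst
        ++ t.drop (t.length - 1)
      = keepRight t := by
  induction t with
  | nil => simp [keepRight]
  | cons a r ih =>
    cases r with
    | nil => simp [keepRight]
    | cons b r' =>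
      have hzip : (a :: b :: r').zip (a :: b :: r').tail
          = (a, b) :: ((b :: r').zip (b :: r').tail) := by simp
      have hdrop : (a :: b :: r').drop ((a :: b :: r').length - 1)
          = (b :: r').drop ((b :: r').length - 1) := by
        simp [List.length_cons]
      rw [hzip, hdrop, keepRight, ← ih]
      by_cases h : b - a < 2
      · have : ¬ (2 ≤ b - a) := by omega
        simp [this, h]
      · have : (2 ≤ b - a) := by omega
        simp [this, h]

-- ===== VERDICT (by name: the statement is the Claim_ definition above) =====
theorem merge_close_values_spec : Claim_equal_merge_close_values := by
  intro values _
  unfold Spec_merge_close_values merge_close_values merge_close_values_alt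
  simp only [PySem.List.slice_from_one, PySem.List.slice_from_neg_one]
  rw [A_eq, B_eq]
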